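-- pv_equiv track=rewrite | github.com/gogi1704/ohrana_bot | util_funs.py | get_unique_counts_safe
-- ===== SOURCE A (Python) =====
-- from collections import Counter
--
-- def normalize(text):
--     return text.strip().lower()
--
-- def get_unique_counts_safe(nested_lists):
--     flat_list = [
--         item.strip() for sublist in nested_lists
--         for item in sublist
--         if isinstance(item, str) and item.strip()
--     ]
--
--     normalized_map = {}
--     for item in flat_list:
--         key = normalize(item)
--         if key not in normalized_map:
--             normalized_map[key] = item.strip()  # Сохраняем первое "нормальное" представление
--
--     # Подсчёт количества по нормализованным значениям
--     counts = Counter(normalize(item) for item in flat_list)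
--
--     # Финальное представление: уникальные нормализованные значения (с заглавной буквы) и количество
--     unique_items = [normalized_map[k].capitalize() for k in counts]
--     counted_items = {normalized_map[k].capitalize(): v for k, v in counts.items()}
--
--     return unique_items, counted_items
-- ===== SOURCE B (Python) =====
-- def get_unique_counts_safe(nested_lists):
--     recs = {}  # key -> (first stripped representative, count), insertion-ordered
--     for sub in nested_lists:
--         for item in sub:
--             if not isinstance(item, str):
--                 continue
--             stripped = item.strip()
--             if not stripped:
--                 continue
--             key = stripped.lower()
--             prev = recs.get(key)
--             recs[key] = (prev[0], prev[1] + 1) if prev is not None else (stripped, 1)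
--     unique_items = [first.capitalize() for first, _ in recs.values()]
--     counted_items = {first.capitalize(): cnt for first, cnt in recs.values()}
--     return unique_items, counted_items
-- ===== Notes on version B (the rewrite author's own statement) =====
-- stated objective: simpler
-- what changed: Replaces A's flat_list + normalized_map + Counter + two key-indexed comprehensions (four passes over the data) with a single insertion-ordered dict built in one traversal, mapping each normalized key to (first stripped form, count), from which both outputs are read off.
import Mathlib
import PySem

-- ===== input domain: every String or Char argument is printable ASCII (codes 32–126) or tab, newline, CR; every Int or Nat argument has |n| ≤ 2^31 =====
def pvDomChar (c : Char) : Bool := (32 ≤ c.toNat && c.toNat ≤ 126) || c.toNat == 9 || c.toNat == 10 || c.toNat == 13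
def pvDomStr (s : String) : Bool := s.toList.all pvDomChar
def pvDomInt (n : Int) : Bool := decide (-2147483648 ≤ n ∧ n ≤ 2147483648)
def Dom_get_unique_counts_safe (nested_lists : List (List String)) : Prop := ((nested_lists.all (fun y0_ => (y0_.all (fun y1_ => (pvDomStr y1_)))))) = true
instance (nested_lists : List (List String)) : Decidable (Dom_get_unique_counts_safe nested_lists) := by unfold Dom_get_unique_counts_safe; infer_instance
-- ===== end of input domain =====

-- B is SIMPLER: one insertion-ordered dict built in a single traversal replaces A's
-- flat_list + normalized_map + Counter + two comprehensions; return values proved equal.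

-- str.capitalize() for the ASCII domain: first char uppercased, rest lowercased
-- (hand-ported step for step; exact on the printable-ASCII domain Dom_ admits).
def pyCapitalize (s : String) : String :=
  match s.toList with
  | [] => ""
  | c :: rest => String.ofList (PySem.Chars.upperChar c :: PySem.Chars.lower rest)

-- ===== PORT A =====
def pyNormalize (text : String) : String := PySem.Str.lower (PySem.Str.strip text)

def get_unique_counts_safe (nested_lists : List (List String)) : List String × (List (String × Int)) :=
  let flat_list : List String :=
    nested_lists.flatMap (fun sublist =>
      (sublist.filter (fun item => !(PySem.Str.strip item == ""))).map
        (fun item => PySem.Str.strip item))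
  let normalized_map : PySem.Dict String String :=
    flat_list.foldl (fun d item =>
      if d.contains (pyNormalize item) then d
      else d.insert (pyNormalize item) (PySem.Str.strip item)) PySem.Dict.empty
  let counts : PySem.Dict String Int := PySem.Dict.counter (flat_list.map pyNormalize)
  -- normalized_map[k]: the key is always present for k ∈ counts (same key set), so the
  -- 'getD ""' default is never read; Python's KeyError is unreachable here.
  let unique_items : List String :=
    counts.keys.map (fun k => pyCapitalize ((normalized_map.get? k).getD ""))
  let counted_items : PySem.Dict String Int :=
    counts.items.foldl (fun d kv =>
      d.insert (pyCapitalize ((normalized_map.get? kv.1).getD "")) kv.2) PySem.Dict.empty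
  (unique_items, counted_items.items)

-- ===== PORT B =====
def get_unique_counts_safe_alt (nested_lists : List (List String)) : List String × (List (String × Int)) :=
  let recs : PySem.Dict String (String × Int) :=
    nested_lists.foldl (fun d sub =>
      sub.foldl (fun d item =>
        let stripped := PySem.Str.strip item
        if stripped == "" then d
        else
          d.insert (PySem.Str.lower stripped)
            (match d.get? (PySem.Str.lower stripped) with
             | some pc => (pc.1, pc.2 + 1)
             | none => (stripped, 1))) d) PySem.Dict.empty
  let unique_items : List String := recs.values.map (fun pc => pyCapitalize pc.1)
  let counted_items : PySem.Dict String Int :=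
    recs.values.foldl (fun d pc => d.insert (pyCapitalize pc.1) pc.2) PySem.Dict.empty
  (unique_items, counted_items.items)

-- ===== PRECONDITION & SPEC =====
def Spec_get_unique_counts_safe (nested_lists : List (List String)) (out : List String × (List (String × Int))) : Prop := out = get_unique_counts_safe_alt nested_lists
instance (nested_lists : List (List String)) (out : List String × (List (String × Int))) : Decidable (Spec_get_unique_counts_safe nested_lists out) := by unfold Spec_get_unique_counts_safe; infer_instance

-- ===== CLAIM (what is proved, stated in full; the proofs are below) =====
def Claim_equal_get_unique_counts_safe : Prop := ∀ (nested_lists : List (List String)), Dom_get_unique_counts_safe nested_lists → Spec_get_unique_counts_safe nested_lists (get_unique_counts_safe nested_lists)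

-- ===== LEMMAS AND PROOFS =====

-- dropWhile facts feeding strip-idempotence
theorem pv_dw_head (p : Char → Bool) (l : List Char) :
    ∀ x ∈ (l.dropWhile p).head?, ¬ p x = true := by
  induction l with
  | nil => simp
  | cons a t ih =>
    by_cases h : p a
    · simpa [h] using ih
    · simp [h]

theorem pv_dw_eq_self (p : Char → Bool) (l : List Char) (h : ∀ x ∈ l.head?, ¬ p x = true) :
    l.dropWhile p = l := by
  cases l with
  | nil => rfl
  | cons a t => simp [h a rfl]

theorem pv_strip_idem_chars (s : List Char) :
    PySem.Chars.strip (PySem.Chars.strip s) = PySem.Chars.strip s := by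
  simp only [PySem.Chars.strip, PySem.Chars.lstrip, PySem.Chars.rstrip]
  set p := PySem.Chars.isspace
  set t := s.dropWhile p with ht
  set X := (t.reverse.dropWhile p).reverse with hX
  have hsuf : t.reverse.dropWhile p <:+ t.reverse := List.dropWhile_suffix p
  have hpre : X <+: t := by
    rw [hX, ← List.reverse_reverse t]
    exact List.reverse_prefix.mpr (by simpa using hsuf)
  have hXhead : ∀ x ∈ X.head?, ¬ p x = true := by
    intro x hx
    obtain ⟨r, hr⟩ := hpre
    have hth : t.head? = some x := by
      rw [← hr, List.head?_append]
      rw [Option.mem_def] at hx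
      simp [hx]
    exact pv_dw_head p s x (by simpa [ht] using hth)
  have h1 : X.dropWhile p = X := pv_dw_eq_self p X hXhead
  rw [h1, hX, List.reverse_reverse, List.dropWhile_idempotent]

theorem pv_strip_idem (s : String) :
    PySem.Str.strip (PySem.Str.strip s) = PySem.Str.strip s := by
  apply String.toList_inj.mp
  simp only [PySem.Str.toList_strip]
  exact pv_strip_idem_chars s.toList

-- the three loop bodies, as functions of an (already stripped) flat item
def pvStepB (d : PySem.Dict String (String × Int)) (s : String) : PySem.Dict String (String × Int) :=
  d.insert (PySem.Str.lower s)
    (match d.get? (PySem.Str.lower s) with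
     | some pc => (pc.1, pc.2 + 1)
     | none => (s, 1))

def pvStepN (d : PySem.Dict String String) (s : String) : PySem.Dict String String :=
  if d.contains (PySem.Str.lower s) then d else d.insert (PySem.Str.lower s) s

def pvStepC (d : PySem.Dict String Int) (s : String) : PySem.Dict String Int :=
  d.insert (PySem.Str.lower s) (d.getD (PySem.Str.lower s) 0 + 1)

-- B's inner loop over one sublist equals a fold of pvStepB over the stripped survivors
theorem pv_flatten_inner (sub : List String) (d : PySem.Dict String (String × Int)) :
    sub.foldl (fun d item =>
        let stripped := PySem.Str.strip item
        if stripped == "" then d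
        else
          d.insert (PySem.Str.lower stripped)
            (match d.get? (PySem.Str.lower stripped) with
             | some pc => (pc.1, pc.2 + 1)
             | none => (stripped, 1))) d
    = ((sub.filter (fun item => !(PySem.Str.strip item == ""))).map
          (fun item => PySem.Str.strip item)).foldl pvStepB d := by
  induction sub generalizing d with
  | nil => rfl
  | cons i t ih =>
    by_cases h : (PySem.Str.strip i == "") = true
    · simp only [List.foldl_cons, List.filter_cons, h, Bool.not_true, if_true]
      exact ih d
    · have h' : (PySem.Str.strip i == "") = false := by simpa using h
      simp only [List.foldl_cons, List.filter_cons, h', Bool.not_false]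
      exact ih _

-- B's nested loop equals a single fold of pvStepB over A's flat_list
theorem pv_flatten (nested_lists : List (List String))
    (d : PySem.Dict String (String × Int)) :
    nested_lists.foldl (fun d sub =>
      sub.foldl (fun d item =>
        let stripped := PySem.Str.strip item
        if stripped == "" then d
        else
          d.insert (PySem.Str.lower stripped)
            (match d.get? (PySem.Str.lower stripped) with
             | some pc => (pc.1, pc.2 + 1)
             | none => (stripped, 1))) d) d
    = (nested_lists.flatMap (fun sublist =>
        (sublist.filter (fun item => !(PySem.Str.strip item == ""))).map
          (fun item => PySem.Str.strip item))).foldl pvStepB d := by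
  rw [List.foldl_flatMap]
  exact PySem.List.foldl_congr_mem _ _ _ _ (fun d sub _ => pv_flatten_inner sub d)

-- pointwise invariant tying B's dict to A's normalized_map and counts
theorem pv_inv (L : List String)
    (dB : PySem.Dict String (String × Int)) (dN : PySem.Dict String String)
    (dC : PySem.Dict String Int)
    (h : ∀ k, ((dB.get? k).map Prod.fst = dN.get? k) ∧ ((dB.get? k).map Prod.snd = dC.get? k)) :
    ∀ k, (((L.foldl pvStepB dB).get? k).map Prod.fst = (L.foldl pvStepN dN).get? k) ∧
         (((L.foldl pvStepB dB).get? k).map Prod.snd = (L.foldl pvStepC dC).get? k) := by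
  induction L generalizing dB dN dC with
  | nil => exact h
  | cons s t ih =>
    simp only [List.foldl_cons]
    apply ih
    intro k
    set key := PySem.Str.lower s with hkey
    by_cases hkk : k = key
    · subst hkk
      cases hB : dB.get? key with
      | some pc =>
        have hN : dN.get? key = some pc.1 := by rw [← (h key).1, hB]; rfl
        have hC : dC.get? key = some pc.2 := by rw [← (h key).2, hB]; rfl
        have hNc : dN.contains key = true := by
          rw [PySem.Dict.contains_eq_isSome_get? _ key, hN]; rfl
        constructor
        · rw [pvStepB, pvStepN, ← hkey, hB, if_pos hNc, PySem.Dict.get?_insert_self, hN]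
          rfl
        · rw [pvStepB, pvStepC, ← hkey, hB, PySem.Dict.get?_insert_self,
              PySem.Dict.get?_insert_self, PySem.Dict.getD_eq_get?_getD, hC]
          rfl
      | none =>
        have hN : dN.get? key = none := by rw [← (h key).1, hB]; rfl
        have hC : dC.get? key = none := by rw [← (h key).2, hB]; rfl
        have hNc : dN.contains key = false := by
          rw [PySem.Dict.contains_eq_isSome_get? _ key, hN]; rfl
        constructor
        · rw [pvStepB, pvStepN, ← hkey, hB, if_neg (by simp [hNc]), PySem.Dict.get?_insert_self,
              PySem.Dict.get?_insert_self]
          rfl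
        · rw [pvStepB, pvStepC, ← hkey, hB, PySem.Dict.get?_insert_self,
              PySem.Dict.get?_insert_self, PySem.Dict.getD_eq_get?_getD, hC]
          rfl
    · have hBk : (pvStepB dB s).get? k = dB.get? k := by
        rw [pvStepB, PySem.Dict.get?_insert_of_ne _ _ hkk]
      have hNk : (pvStepN dN s).get? k = dN.get? k := by
        rw [pvStepN]; split
        · rfl
        · rw [PySem.Dict.get?_insert_of_ne _ _ hkk]
      have hCk : (pvStepC dC s).get? k = dC.get? k := by
        rw [pvStepC, PySem.Dict.get?_insert_of_ne _ _ hkk]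
      rw [hBk, hNk, hCk]; exact h k

theorem pv_main (nl : List (List String)) :
    get_unique_counts_safe nl = get_unique_counts_safe_alt nl := by
  unfold get_unique_counts_safe get_unique_counts_safe_alt
  set F := nl.flatMap (fun sublist =>
      (sublist.filter (fun item => !(PySem.Str.strip item == ""))).map
        (fun item => PySem.Str.strip item)) with hF
  have hstripF : ∀ x ∈ F, PySem.Str.strip x = x := by
    intro x hx
    rw [hF] at hx
    simp only [List.mem_flatMap, List.mem_map, List.mem_filter] at hx
    obtain ⟨sub, _, raw, _, rfl⟩ := hx
    exact pv_strip_idem raw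
  have hnormF : ∀ x ∈ F, pyNormalize x = PySem.Str.lower x := by
    intro x hx; rw [pyNormalize, hstripF x hx]
  -- B's dict as a single fold
  have hB : nl.foldl (fun d sub =>
      sub.foldl (fun d item =>
        let stripped := PySem.Str.strip item
        if stripped == "" then d
        else
          d.insert (PySem.Str.lower stripped)
            (match d.get? (PySem.Str.lower stripped) with
             | some pc => (pc.1, pc.2 + 1)
             | none => (stripped, 1))) d) PySem.Dict.empty
      = F.foldl pvStepB PySem.Dict.empty := pv_flatten nl PySem.Dict.empty
  -- A's normalized_map as a pvStepN fold
  have hN : F.foldl (fun d item =>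
      if d.contains (pyNormalize item) then d
      else d.insert (pyNormalize item) (PySem.Str.strip item)) PySem.Dict.empty
      = F.foldl pvStepN PySem.Dict.empty := by
    apply PySem.List.foldl_congr_mem
    intro acc x hx
    rw [pvStepN, hnormF x hx, hstripF x hx]
  -- A's counter as a pvStepC fold
  have hmapF : F.map pyNormalize = F.map PySem.Str.lower := List.map_congr_left hnormF
  have hC : PySem.Dict.counter (F.map pyNormalize) = F.foldl pvStepC PySem.Dict.empty := by
    rw [hmapF, ← PySem.Dict.foldl_insert_getD_add_one_eq_counter, List.foldl_map]
    rfl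
  set R := F.foldl pvStepB PySem.Dict.empty with hR
  set N := F.foldl pvStepN PySem.Dict.empty with hNd
  set C := F.foldl pvStepC PySem.Dict.empty with hCd
  have hrel := pv_inv F PySem.Dict.empty PySem.Dict.empty PySem.Dict.empty
    (by intro k; constructor <;> simp [PySem.Dict.get?_empty])
  have hrelN : ∀ k, (R.get? k).map Prod.fst = N.get? k := fun k => (hrel k).1
  have hrelC : ∀ k, (R.get? k).map Prod.snd = C.get? k := fun k => (hrel k).2
  -- key sets coincide
  have hkeysR : R.keys = PySem.Set.ofList (F.map PySem.Str.lower) := by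
    rw [hR]
    rw [show pvStepB = fun (d : PySem.Dict String (String × Int)) (s : String) =>
        d.insert (PySem.Str.lower s)
          (match d.get? (PySem.Str.lower s) with
           | some pc => (pc.1, pc.2 + 1)
           | none => (s, 1)) from rfl]
    rw [PySem.Dict.keys_foldl_insert_key F PySem.Str.lower _ PySem.Dict.empty]
    rw [PySem.Dict.keys_empty, PySem.Set.update_nil_left]
  have hCcounter : C = PySem.Dict.counter (F.map PySem.Str.lower) := by
    rw [hCd, ← PySem.Dict.foldl_insert_getD_add_one_eq_counter, List.foldl_map]
    rfl
  have hkeysC : C.keys = PySem.Set.ofList (F.map PySem.Str.lower) := by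
    rw [hCcounter, PySem.Dict.keys_counter]
  have hnodupR : R.keys.Nodup := by
    rw [hkeysR]; exact PySem.Set.nodup_ofList _
  have hnodupC : C.keys.Nodup := by
    rw [hCcounter]; exact PySem.Dict.nodup_keys_counter _
  -- pointwise facts on the common key list
  have hpt : ∀ k ∈ R.keys,
      (N.get? k).getD "" = (R.getD k ("", 0)).1 ∧ C.getD k 0 = (R.getD k ("", 0)).2 := by
    intro k hk
    have hcont : R.contains k = true := (PySem.Dict.contains_iff_mem_keys R k).mpr hk
    rw [PySem.Dict.contains_eq_isSome_get?] at hcont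
    obtain ⟨v, hv⟩ := Option.isSome_iff_exists.mp hcont
    have hgd : R.getD k ("", 0) = v := by
      rw [PySem.Dict.getD_eq_get?_getD, hv]; rfl
    constructor
    · rw [← hrelN k, hv, hgd]; rfl
    · rw [PySem.Dict.getD_eq_get?_getD, ← hrelC k, hv, hgd]; rfl
  -- unique_items agree
  have hU : C.keys.map (fun k => pyCapitalize ((N.get? k).getD ""))
      = R.values.map (fun pc => pyCapitalize pc.1) := by
    rw [PySem.Dict.values_eq_map_keys R hnodupR ("", 0), List.map_map, hkeysC, ← hkeysR]
    apply List.map_congr_left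
    intro k hk
    simp only [Function.comp]
    rw [(hpt k hk).1]
  -- counted_items agree
  have hI : C.items.foldl (fun d kv =>
        d.insert (pyCapitalize ((N.get? kv.1).getD "")) kv.2) PySem.Dict.empty
      = R.values.foldl (fun d pc =>
        d.insert (pyCapitalize pc.1) pc.2) PySem.Dict.empty := by
    rw [PySem.Dict.items_eq_map_keys C hnodupC 0, List.foldl_map,
        PySem.Dict.values_eq_map_keys R hnodupR ("", 0), List.foldl_map,
        hkeysC, ← hkeysR]
    apply PySem.List.foldl_congr_mem
    intro acc k hk
    rw [(hpt k hk).1, (hpt k hk).2]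
  simp only [hB, hN, hC, hU, hI]
  
-- ===== VERDICT (by name: the statement is the Claim_ definition above) =====
theorem get_unique_counts_safe_spec : Claim_equal_get_unique_counts_safe := by
  intro nl _
  unfold Spec_get_unique_counts_safe
  exact pv_main nl
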